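-- pv_equiv track=rewrite | github.com/bob686868/Leetcode-100-day-challenge- | day32.py | minOpsToMake0
-- ===== SOURCE A (Python) =====
-- def minOpsToMake0(n):
--     res=0
--     i=1
--     while n>0:
--         bit=n%2
--         n//=2
--         if bit:
--             res=-res
--             res+=(2**i-1)
--         i+=1
--     return res
-- ===== SOURCE B (Python) =====
-- def minOpsToMake0(n):
--     if n <= 0:
--         return 0
--     b = n
--     while n:
--         n >>= 1
--         b ^= n
--     return b
-- ===== Notes on version B (the rewrite author's own statement) =====
-- stated objective: idiomatic
-- what changed: B recognizes A as Gray-code-to-binary decoding and computes it as a running XOR of successively right-shifted copies of n, instead of accumulating alternating-sign (2**i - 1) terms bit by bit.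
import Mathlib
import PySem

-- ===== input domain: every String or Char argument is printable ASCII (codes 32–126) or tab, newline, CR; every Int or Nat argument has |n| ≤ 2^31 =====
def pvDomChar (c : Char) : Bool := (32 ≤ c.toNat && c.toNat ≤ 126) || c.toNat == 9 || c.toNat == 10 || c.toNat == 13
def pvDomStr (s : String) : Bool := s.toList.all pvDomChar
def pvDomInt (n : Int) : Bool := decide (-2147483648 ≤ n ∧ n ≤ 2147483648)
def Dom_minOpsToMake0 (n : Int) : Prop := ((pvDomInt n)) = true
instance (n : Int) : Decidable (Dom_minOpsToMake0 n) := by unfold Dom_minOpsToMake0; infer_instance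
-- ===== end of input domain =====

-- B replaces A's alternating-sign accumulation of (2^i - 1) terms by an XOR fold of
-- right-shifted copies of n (Gray-code decoding); same values, no speed claim.

-- ===== PORT A =====
-- the while loop of A, state (n, res, i); Python's i starts at 1 and only increments,
-- so it is kept as a Nat exponent (2**i - 1 with i ≥ 1)
def pvALoop (n res : Int) (i : Nat) : Int :=
  if n > 0 then
    let bit := PySem.Int.mod n 2
    let n' := PySem.Int.floordiv n 2
    let res' := if bit ≠ 0 then -res + (2 ^ i - 1) else res
    pvALoop n' res' (i + 1)
  else res
termination_by n.toNat
decreasing_by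
  rename_i h
  rw [PySem.Int.floordiv_eq_ediv_of_pos (by omega)]
  omega

def minOpsToMake0 (n : Int) : Int := pvALoop n 0 1

-- ===== PORT B =====
-- Source B's while loop; after the n ≤ 0 guard both n and b are nonnegative, so the loop
-- state lives in Nat (Python's >> and ^ on these nonnegative ints coincide with Nat's)
def pvBLoop (n b : Nat) : Nat :=
  if n ≠ 0 then pvBLoop (n >>> 1) (b ^^^ (n >>> 1)) else b
termination_by n
decreasing_by
  rename_i h
  simp only [Nat.shiftRight_one]
  omega

def minOpsToMake0_alt (n : Int) : Int :=
  if n ≤ 0 then 0 else ((pvBLoop n.toNat n.toNat : Nat) : Int)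

-- ===== PRECONDITION & SPEC =====
def Spec_minOpsToMake0 (n : Int) (out : Int) : Prop := out = minOpsToMake0_alt n
instance (n : Int) (out : Int) : Decidable (Spec_minOpsToMake0 n out) := by unfold Spec_minOpsToMake0; infer_instance

-- ===== CLAIM (what is proved, stated in full; the proofs are below) =====
def Claim_equal_minOpsToMake0 : Prop := ∀ (n : Int), Dom_minOpsToMake0 n → Spec_minOpsToMake0 n (minOpsToMake0 n)

-- ===== LEMMAS AND PROOFS =====

-- Gray-code-to-binary decoding: the common mathematical value of both loops
def grayDec (m : Nat) : Nat :=
  if m = 0 then 0 else m ^^^ grayDec (m / 2)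
termination_by m
decreasing_by omega

theorem grayDec_div_two (m : Nat) : grayDec m / 2 = grayDec (m / 2) := by
  induction m using Nat.strong_induction_on with
  | _ m IH =>
    by_cases hm : m = 0
    · subst hm; simp [grayDec]
    · rw [grayDec, if_neg hm, Nat.xor_div_two, IH (m / 2) (by omega)]
      by_cases h2 : m / 2 = 0
      · simp [h2, grayDec]
      · conv_rhs => rw [grayDec, if_neg h2]

theorem grayDec_mod_two (m : Nat) (hm : m ≠ 0) :
    grayDec m % 2 = (m % 2) ^^^ (grayDec (m / 2) % 2) := by
  rw [grayDec, if_neg hm]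
  have := Nat.xor_mod_two_pow (a := m) (b := grayDec (m / 2)) (n := 1)
  simpa [pow_one] using this

theorem pvALoop_gray (m : Nat) : ∀ (res : Int) (i : Nat),
    pvALoop (m : Int) res (i + 1) =
      2 ^ i * (grayDec m : Int) +
        (if grayDec m % 2 = 0 then res else (2 ^ i - 1) - res) := by
  induction m using Nat.strong_induction_on with
  | _ m IH =>
    intro res i
    by_cases hm : m = 0
    · subst hm
      rw [pvALoop]
      simp [grayDec]
    · have hpos : (0 : Int) < (m : Int) := by exact_mod_cast Nat.pos_of_ne_zero hm
      rw [pvALoop, if_pos hpos]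
      have hmod : PySem.Int.mod (m : Int) 2 = ((m % 2 : Nat) : Int) := by
        exact_mod_cast PySem.Int.mod_natCast m 2
      have hdiv : PySem.Int.floordiv (m : Int) 2 = ((m / 2 : Nat) : Int) := by
        exact_mod_cast PySem.Int.floordiv_natCast m 2
      simp only [hmod, hdiv]
      have hd2 : grayDec m / 2 = grayDec (m / 2) := grayDec_div_two m
      have hm2 : grayDec m % 2 = (m % 2) ^^^ (grayDec (m / 2) % 2) := grayDec_mod_two m hm
      have hsplit : grayDec m = 2 * (grayDec m / 2) + grayDec m % 2 := by omega
      rcases Nat.mod_two_eq_zero_or_one m with hb | hb <;>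
        rcases Nat.mod_two_eq_zero_or_one (grayDec (m / 2)) with hg | hg <;>
        rw [hb, hg] at hm2 <;> simp at hm2
      -- four cases: (m % 2, grayDec (m/2) % 2) ∈ {0,1}²
      · -- bit 0, parity even
        have hval : grayDec m = 2 * grayDec (m / 2) := by omega
        rw [hb]
        have hc : ¬ (((0 : Nat) : Int) ≠ 0) := by simp
        rw [if_neg hc, IH (m / 2) (by omega) res (i + 1), hval]
        simp [Nat.mul_mod_right, hg]
        push_cast [pow_succ]
        ring
      · -- bit 0, parity odd
        have hval : grayDec m = 2 * grayDec (m / 2) + 1 := by omega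
        rw [hb]
        have hc : ¬ (((0 : Nat) : Int) ≠ 0) := by simp
        rw [if_neg hc, IH (m / 2) (by omega) res (i + 1), hval]
        simp [hg]
        push_cast [pow_succ]
        ring
      · -- bit 1, parity even
        have hval : grayDec m = 2 * grayDec (m / 2) + 1 := by omega
        rw [hb]
        have hc : (((1 : Nat) : Int) ≠ 0) := by simp
        rw [if_pos hc, IH (m / 2) (by omega) (-res + (2 ^ (i + 1) - 1)) (i + 1), hval]
        simp [hg]
        push_cast [pow_succ]
        ring
      · -- bit 1, parity odd
        have hval : grayDec m = 2 * grayDec (m / 2) := by omega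
        rw [hb]
        have hc : (((1 : Nat) : Int) ≠ 0) := by simp
        rw [if_pos hc, IH (m / 2) (by omega) (-res + (2 ^ (i + 1) - 1)) (i + 1), hval]
        simp [Nat.mul_mod_right, hg]
        push_cast [pow_succ]
        ring

theorem pvBLoop_gray (n : Nat) : ∀ b : Nat, pvBLoop n b = b ^^^ (grayDec n ^^^ n) := by
  induction n using Nat.strong_induction_on with
  | _ n IH =>
    intro b
    by_cases hn : n = 0
    · subst hn; rw [pvBLoop]; simp [grayDec]
    · rw [pvBLoop, if_pos hn]
      simp only [Nat.shiftRight_one]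
      rw [IH (n / 2) (by omega) (b ^^^ n / 2)]
      conv_rhs => rw [grayDec, if_neg hn]
      -- both sides reduce to b ^^^ grayDec (n / 2) by xor cancellation
      rw [Nat.xor_assoc, Nat.xor_assoc]
      congr 1
      rw [Nat.xor_comm (grayDec (n / 2)) (n / 2), ← Nat.xor_assoc, Nat.xor_self,
        Nat.zero_xor, ← Nat.xor_assoc, Nat.xor_comm n (grayDec (n / 2)),
        Nat.xor_assoc, Nat.xor_self, Nat.xor_zero]

theorem pvALoop_one (m : Nat) : pvALoop (m : Int) 0 1 = (grayDec m : Int) := by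
  calc pvALoop (m : Int) 0 1
      = 2 ^ 0 * (grayDec m : Int) +
        (if grayDec m % 2 = 0 then (0 : Int) else (2 ^ 0 - 1) - 0) := pvALoop_gray m 0 0
    _ = (grayDec m : Int) := by split_ifs <;> norm_num

-- ===== VERDICT (by name: the statement is the Claim_ definition above) =====
theorem minOpsToMake0_spec : Claim_equal_minOpsToMake0 := by
  unfold Claim_equal_minOpsToMake0
  intro n _
  unfold Spec_minOpsToMake0 minOpsToMake0 minOpsToMake0_alt
  by_cases h : n ≤ 0
  · rw [if_pos h, pvALoop, if_neg (by omega)]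
  · rw [if_neg h]
    have hn : n = ((n.toNat : Nat) : Int) := by omega
    rw [hn]
    simp only [Int.toNat_natCast]
    rw [pvALoop_one n.toNat, pvBLoop_gray n.toNat n.toNat,
      Nat.xor_comm (grayDec n.toNat) n.toNat, ← Nat.xor_assoc, Nat.xor_self, Nat.zero_xor]
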